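-- pv_equiv track=rewrite | github.com/dawoodaijaz97/Leetcode | number-of-perfect-pairs/solution.py | solve
-- ===== SOURCE A (Python) =====
-- def solve(nums: list[int]) -> int:
--     def is_perfect_pair(a: int, b: int) -> bool:
--         min_val = min(abs(a - b), abs(a + b))
--         max_val = max(abs(a - b), abs(a + b))
--         return min(min_val, abs(a), abs(b)) == min_val and max(max_val, abs(a), abs(b)) == max_val
--
--     count = 0
--     n = len(nums)
--     for i in range(n):
--         for j in range(i + 1, n):
--             if is_perfect_pair(nums[i], nums[j]):
--                 count += 1
--     return count
-- ===== SOURCE B (Python) =====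
-- def solve(nums: list[int]) -> int:
--     xs = sorted(abs(v) for v in nums)
--     count = 0
--     l = 0
--     for r in range(len(xs)):
--         while 2 * xs[l] < xs[r]:
--             l += 1
--         count += r - l
--     return count
-- ===== Notes on version B (the rewrite author's own statement) =====
-- stated objective: faster
-- what changed: Replaced the O(n^2) all-pairs scan with the complex min/max predicate by sorting the absolute values once and counting pairs with max<=2*min via a single two-pointer sweep.
import Mathlib
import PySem

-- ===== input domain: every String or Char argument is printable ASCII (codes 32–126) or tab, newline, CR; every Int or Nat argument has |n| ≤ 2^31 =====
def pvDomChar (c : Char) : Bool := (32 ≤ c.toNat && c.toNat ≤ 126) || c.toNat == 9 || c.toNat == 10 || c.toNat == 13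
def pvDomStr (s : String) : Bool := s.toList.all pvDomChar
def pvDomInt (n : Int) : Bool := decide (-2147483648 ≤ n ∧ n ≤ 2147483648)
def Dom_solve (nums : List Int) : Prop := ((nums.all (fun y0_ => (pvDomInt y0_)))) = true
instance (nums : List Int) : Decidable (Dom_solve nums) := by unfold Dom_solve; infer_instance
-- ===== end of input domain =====

-- B sorts the absolute values once and counts pairs with max ≤ 2·min by a two-pointer sweep
-- instead of A's all-pairs scan with the min/max predicate.

-- ===== PORT A =====
def pvIsPerfect (a b : Int) : Bool :=
  let minVal := min |a - b| |a + b|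
  let maxVal := max |a - b| |a + b|
  (min (min minVal |a|) |b| == minVal) && (max (max maxVal |a|) |b| == maxVal)

def solve (nums : List Int) : Int :=
  (PySem.List.pyRange 0 (PySem.List.len nums) 1).foldl (fun count i =>
    (PySem.List.pyRange (i + 1) (PySem.List.len nums) 1).foldl (fun count j =>
      if pvIsPerfect (PySem.List.pyGetD nums i 0) (PySem.List.pyGetD nums j 0)
      then count + 1 else count) count) 0

-- ===== PORT B =====
-- the `while 2*xs[l] < xs[r]: l += 1` loop; fuel makes the recursion structural
-- (fuel = len(xs) always suffices because the loop stops at l = r at the latest)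
def pvAdv (xs : List Int) (t : Int) : Nat → Nat → Nat
  | 0, l => l
  | fuel + 1, l => if 2 * xs.getD l 0 < t then pvAdv xs t fuel (l + 1) else l

def solve_alt (nums : List Int) : Int :=
  let xs := PySem.List.sorted (nums.map (fun v => |v|)) (fun x => x) false
  ((List.range xs.length).foldl (fun (st : Int × Nat) r =>
      let l := pvAdv xs (xs.getD r 0) xs.length st.2
      (st.1 + ((r : Int) - (l : Int)), l)) (0, 0)).1

-- ===== PRECONDITION & SPEC =====
def Spec_solve (nums : List Int) (out : Int) : Prop := out = solve_alt nums
instance (nums : List Int) (out : Int) : Decidable (Spec_solve nums out) := by unfold Spec_solve; infer_instance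

-- ===== CLAIM (what is proved, stated in full; the proofs are below) =====
def Claim_equal_solve : Prop := ∀ (nums : List Int), Dom_solve nums → Spec_solve nums (solve nums)

-- ===== LEMMAS AND PROOFS =====

-- A's pair predicate, seen on the absolute values: "perfect" ⟺ max |a| |b| ≤ 2 · min |a| |b|
def pvQ (x y : Int) : Bool := decide (max x y ≤ 2 * min x y)

-- unordered pair count of a binary predicate, head against tail
def pvPC (Q : Int → Int → Bool) : List Int → Int
  | [] => 0
  | a :: l => (l.countP (Q a) : Int) + pvPC Q l

lemma pvIsPerfect_eq (a b : Int) : pvIsPerfect a b = pvQ |a| |b| := by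
  simp only [pvIsPerfect, pvQ]
  rw [Bool.eq_iff_iff]
  simp only [Bool.and_eq_true, beq_iff_eq, decide_eq_true_eq, min_def, max_def,
    Int.abs_eq_natAbs]
  split_ifs <;> omega

lemma pvSum_list (n : Nat) (f : Nat → Int) :
    ((List.range n).map f).sum = ∑ i ∈ Finset.range n, f i := by
  induction n with
  | zero => simp
  | succ n ih => rw [List.range_succ, Finset.sum_range_succ]; simp [ih]

-- ---------- A-side: solve = pvPC pvIsPerfect ----------

lemma solve_eq_sum (nums : List Int) :
    solve nums
      = ∑ k ∈ Finset.range nums.length,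
          (((nums.drop (k + 1)).countP (pvIsPerfect (nums.getD k 0))) : Int) := by
  unfold solve
  rw [PySem.List.pyRange_one]
  simp only [PySem.List.len_eq, sub_zero, Int.toNat_natCast, zero_add]
  rw [List.foldl_map]
  rw [PySem.List.foldl_congr_mem
    (g := fun (count : Int) (k : Nat) =>
      count + (((nums.drop (k + 1)).countP (pvIsPerfect (nums.getD k 0))) : Int))]
  · rw [PySem.List.foldl_add, pvSum_list]; ring
  · intro acc k _
    rw [show ((k:Int) + 1) = (((k+1 : Nat)) : Int) by push_cast; ring]
    rw [PySem.List.foldl_pyRange_pyGetD' nums 0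
      (fun (c : Int) (x : Int) => if pvIsPerfect (PySem.List.pyGetD nums (k:Int) 0) x then c + 1 else c)
      acc (by positivity)]
    rw [PySem.List.foldl_if_add_one]
    simp [PySem.List.pyGetD_natCast]

lemma sumA (P : Int → Int → Bool) (nums : List Int) :
    (∑ k ∈ Finset.range nums.length,
        (((nums.drop (k + 1)).countP (P (nums.getD k 0))) : Int)) = pvPC P nums := by
  induction nums with
  | nil => simp [pvPC]
  | cons a l ih =>
    rw [List.length_cons, Finset.sum_range_succ']
    simp only [List.drop_succ_cons, List.getD_cons_succ, List.getD_cons_zero, List.drop_zero]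
    rw [ih]
    simp only [pvPC]
    ring

-- ---------- pair counts: map through abs, permutation invariance ----------

lemma pvPC_map_abs (nums : List Int) :
    pvPC pvIsPerfect nums = pvPC pvQ (nums.map (fun v => |v|)) := by
  induction nums with
  | nil => rfl
  | cons a l ih =>
    simp only [pvPC, List.map_cons, List.countP_map]
    rw [ih]
    congr 2
    exact List.countP_congr (fun x _ => by simp [Function.comp, pvIsPerfect_eq])

lemma pvPC_perm (Q : Int → Int → Bool) (hQ : ∀ x y, Q x y = Q y x)
    {l1 l2 : List Int} (h : l1.Perm l2) : pvPC Q l1 = pvPC Q l2 := by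
  induction h with
  | nil => rfl
  | cons x h ih => simp only [pvPC, ih, h.countP_eq]
  | swap x y l =>
    simp only [pvPC, List.countP_cons, ← hQ x y]
    split_ifs <;> push_cast <;> ring
  | trans h1 h2 ih1 ih2 => rw [ih1, ih2]

-- ---------- prefix-sum formulation of the pair count ----------

lemma pvCount_as_sum (p : Int → Bool) (l : List Int) :
    (∑ k ∈ Finset.range l.length, (if p (l.getD k 0) then (1:Int) else 0)) = (l.countP p : Int) := by
  induction l with
  | nil => simp
  | cons a t ih =>
    rw [List.length_cons, Finset.sum_range_succ']
    simp only [List.getD_cons_succ, List.getD_cons_zero, List.countP_cons, ih]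
    by_cases h : p a <;> simp [h]

lemma sumB (Q : Int → Int → Bool) (xs : List Int) :
    (∑ r ∈ Finset.range xs.length,
        (((xs.take r).countP (fun x => Q x (xs.getD r 0))) : Int)) = pvPC Q xs := by
  induction xs with
  | nil => simp [pvPC]
  | cons a l ih =>
    rw [List.length_cons, Finset.sum_range_succ']
    simp only [List.getD_cons_succ, List.take_succ_cons, List.countP_cons, List.take_zero,
      List.getD_cons_zero, List.countP_nil]
    push_cast
    rw [Finset.sum_add_distrib, ih, pvCount_as_sum (fun x => Q a x) l]
    simp only [pvPC]
    ring

-- ---------- window counting on a sorted list ----------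

lemma pvGetD_mono (xs : List Int) (hs : xs.Pairwise (· ≤ ·)) {i j : Nat}
    (hij : i ≤ j) (hj : j < xs.length) : xs.getD i 0 ≤ xs.getD j 0 := by
  rcases eq_or_lt_of_le hij with rfl | hlt
  · exact le_refl _
  · rw [List.getD_eq_getElem xs 0 (lt_of_le_of_lt hij hj), List.getD_eq_getElem xs 0 hj]
    exact (List.pairwise_iff_getElem.mp hs) i j _ _ hlt

lemma pvCount_window (xs : List Int) (p : Int → Bool) (l r : Nat)
    (hr : r ≤ xs.length) (hlr : l ≤ r)
    (hfail : ∀ i < l, p (xs.getD i 0) = false)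
    (hok : ∀ i, l ≤ i → i < r → p (xs.getD i 0) = true) :
    (xs.take r).countP p = r - l := by
  have hsplit : xs.take r = xs.take l ++ (xs.take r).drop l := by
    conv_lhs => rw [← List.take_append_drop l (xs.take r)]
    rw [List.take_take, min_eq_left hlr]
  have hlen : ((xs.take r).drop l).length = r - l := by
    simp only [List.length_drop, List.length_take]; omega
  have h0 : (xs.take l).countP p = 0 := by
    apply List.countP_eq_zero.mpr
    intro a ha
    obtain ⟨i, hi, hia⟩ := List.mem_iff_getElem.mp ha
    have hi' : i < l := by simp only [List.length_take] at hi; omega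
    have hax : a = xs.getD i 0 := by
      rw [List.getD_eq_getElem xs 0 (by omega), ← hia, List.getElem_take]
    rw [Bool.not_eq_true, hax]
    exact hfail i hi'
  have h1 : ((xs.take r).drop l).countP p = ((xs.take r).drop l).length := by
    apply List.countP_eq_length.mpr
    intro a ha
    obtain ⟨i, hi, hia⟩ := List.mem_iff_getElem.mp ha
    rw [hlen] at hi
    have hax : a = xs.getD (l + i) 0 := by
      rw [List.getD_eq_getElem xs 0 (by omega), ← hia, List.getElem_drop, List.getElem_take]
    rw [hax]
    exact hok (l + i) (by omega) (by omega)
  rw [hsplit, List.countP_append, h0, h1, hlen]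
  omega

-- ---------- the while loop ----------

lemma pvAdv_spec (xs : List Int) (t : Int) :
    ∀ (fuel l j : Nat), l ≤ j → j ≤ l + fuel → t ≤ 2 * xs.getD j 0 →
      l ≤ pvAdv xs t fuel l ∧ pvAdv xs t fuel l ≤ j ∧
      (∀ i, l ≤ i → i < pvAdv xs t fuel l → 2 * xs.getD i 0 < t) ∧
      t ≤ 2 * xs.getD (pvAdv xs t fuel l) 0 := by
  intro fuel
  induction fuel with
  | zero =>
    intro l j hlj hjl ht
    have hj : j = l := by omega
    subst hj
    refine ⟨le_refl _, le_refl _, ?_, ht⟩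
    intro i h1 h2
    simp only [pvAdv] at h2
    omega
  | succ fuel ih =>
    intro l j hlj hjl ht
    by_cases h : 2 * xs.getD l 0 < t
    · have h1 : l + 1 ≤ j := by
        rcases Nat.eq_or_lt_of_le hlj with rfl | h2
        · omega
        · omega
      obtain ⟨a1, a2, a3, a4⟩ := ih (l + 1) j h1 (by omega) ht
      refine ⟨?_, ?_, ?_, ?_⟩ <;> simp only [pvAdv, if_pos h]
      · omega
      · exact a2
      · intro i hi1 hi2
        rcases Nat.eq_or_lt_of_le hi1 with rfl | hgt
        · exact h
        · exact a3 i (by omega) hi2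
      · exact a4
    · refine ⟨?_, ?_, ?_, ?_⟩ <;> simp only [pvAdv, if_neg h]
      · omega
      · exact hlj
      · intro i h1 h2; omega
      · omega

-- ---------- the two-pointer sweep computes the prefix sums ----------

def pvRunB (xs : List Int) (n : Nat) : Int × Nat :=
  (List.range n).foldl (fun (st : Int × Nat) r =>
      let l := pvAdv xs (xs.getD r 0) xs.length st.2
      (st.1 + ((r : Int) - (l : Int)), l)) (0, 0)

lemma pvRunB_inv (xs : List Int) (hs : xs.Pairwise (· ≤ ·)) (hpos : ∀ x ∈ xs, 0 ≤ x) :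
    ∀ n, n ≤ xs.length →
      (pvRunB xs n).1 = (∑ r ∈ Finset.range n,
          (((xs.take r).countP (fun x => decide (xs.getD r 0 ≤ 2 * x))) : Int))
      ∧ (∀ i < (pvRunB xs n).2, 2 * xs.getD i 0 < xs.getD (n - 1) 0)
      ∧ (pvRunB xs n).2 ≤ n - 1 := by
  intro n
  induction n with
  | zero =>
    intro _
    refine ⟨by simp [pvRunB], ?_, ?_⟩ <;> simp [pvRunB]
  | succ n ih =>
    intro hlen
    obtain ⟨ic, il, ib⟩ := ih (by omega)
    have hnlt : n < xs.length := by omega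
    have hnn : 0 ≤ xs.getD n 0 := by
      rw [List.getD_eq_getElem xs 0 hnlt]
      exact hpos _ (List.getElem_mem hnlt)
    obtain ⟨a1, a2, a3, a4⟩ := pvAdv_spec xs (xs.getD n 0) xs.length (pvRunB xs n).2 n
      (by omega) (by omega) (by omega)
    set l' := pvAdv xs (xs.getD n 0) xs.length (pvRunB xs n).2 with hl'
    have hstep : pvRunB xs (n + 1) = ((pvRunB xs n).1 + ((n : Int) - (l' : Int)), l') := by
      unfold pvRunB
      rw [List.range_succ, List.foldl_append]
      rfl
    have hfail : ∀ i < l', 2 * xs.getD i 0 < xs.getD n 0 := by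
      intro i hi
      by_cases hc : i < (pvRunB xs n).2
      · calc 2 * xs.getD i 0 < xs.getD (n - 1) 0 := il i hc
          _ ≤ xs.getD n 0 := pvGetD_mono xs hs (by omega) hnlt
      · exact a3 i (by omega) hi
    have hok : ∀ i, l' ≤ i → i < n → xs.getD n 0 ≤ 2 * xs.getD i 0 := by
      intro i h1 h2
      have hmono : xs.getD l' 0 ≤ xs.getD i 0 := pvGetD_mono xs hs h1 (by omega)
      omega
    have hcnt : (xs.take n).countP (fun x => decide (xs.getD n 0 ≤ 2 * x)) = n - l' := by
      apply pvCount_window xs _ l' n (by omega) a2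
      · intro i hi; simpa using hfail i hi
      · intro i hi1 hi2; simpa using hok i hi1 hi2
    refine ⟨?_, ?_, ?_⟩
    · rw [hstep, Finset.sum_range_succ, ← ic, hcnt, Nat.cast_sub a2]
    · rw [hstep]
      simpa using hfail
    · rw [hstep]
      simp only [Nat.add_sub_cancel]
      exact a2

-- ===== VERDICT (by name: the statement is the Claim_ definition above) =====
theorem solve_spec : Claim_equal_solve := by
  intro nums _
  unfold Spec_solve
  have hQsym : ∀ x y, pvQ x y = pvQ y x := by
    intro x y; simp [pvQ, max_comm, min_comm]
  set xs := PySem.List.sorted (nums.map (fun v => |v|)) (fun x => x) false with hxs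
  have hperm : xs.Perm (nums.map (fun v => |v|)) := PySem.List.sorted_perm _ _ _
  have hs : xs.Pairwise (· ≤ ·) := PySem.List.sorted_pairwise _ _
  have hpos : ∀ x ∈ xs, 0 ≤ x := by
    intro x hx
    obtain ⟨v, _, rfl⟩ := List.mem_map.mp (hperm.mem_iff.mp hx)
    exact abs_nonneg v
  have halt : solve_alt nums = (pvRunB xs xs.length).1 := rfl
  obtain ⟨hc, -, -⟩ := pvRunB_inv xs hs hpos xs.length (le_refl _)
  rw [halt, hc, solve_eq_sum, sumA, pvPC_map_abs nums,
    pvPC_perm pvQ hQsym hperm.symm, ← sumB pvQ xs]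
  apply Finset.sum_congr rfl
  intro r hr
  have hrlt : r < xs.length := Finset.mem_range.mp hr
  congr 1
  apply List.countP_congr
  intro x hx
  have hx0 : 0 ≤ x := hpos x (List.take_subset _ _ hx)
  have hxr : x ≤ xs.getD r 0 := by
    obtain ⟨i, hi, hix⟩ := List.mem_iff_getElem.mp hx
    have hil : i < r := by simp only [List.length_take] at hi; omega
    have hax : x = xs.getD i 0 := by
      rw [List.getD_eq_getElem xs 0 (by omega), ← hix, List.getElem_take]
    rw [hax]
    exact pvGetD_mono xs hs (le_of_lt hil) hrlt
  simp only [pvQ, decide_eq_true_eq]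
  rw [max_def, min_def]
  split_ifs <;> omega
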